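-- pv_equiv track=rewrite | github.com/epilectrik/voynich | scripts/add_fl_fields.py | get_fl_state
-- ===== SOURCE A (Python) =====
-- FL_STAGE_MAP = {
--     # INITIAL: Material entering
--     'ii': ('INITIAL', 'raw input'),      # Unprocessed material
--     'i': ('INITIAL', 'input'),           # Material entering
--     'an': ('INITIAL', 'adding'),         # Active addition
--     'a': ('INITIAL', 'begin'),
--
--     # EARLY: Material received
--     'in': ('EARLY', 'loaded'),
--
--     # MEDIAL: Transformation in progress
--     'r': ('MEDIAL', 'reacting'),
--     'ar': ('MEDIAL', 'needs adjust'),    # Signal: adjustment needed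
--     'al': ('MEDIAL', 'adjusting'),       # Action: making adjustment
--     'l': ('MEDIAL', 'separating'),
--     'ol': ('MEDIAL', 'processing'),
--     's': ('MEDIAL', 'next'),
--     'aiin': ('MEDIAL', 'still separating'),  # Continuation
--     'ain': ('MEDIAL', 'separating'),
--     'or': ('MEDIAL', 'continue'),
--     'yl': ('MEDIAL', 'pouring'),
--     'd': ('MEDIAL', 'during'),
--     't': ('MEDIAL', 'transfer'),
--
--     # LATE: Approaching completion
--     'o': ('LATE', 'nearly done'),
--     'ly': ('LATE', 'settling out'),
--     'oiin': ('LATE', 'settling'),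
--
--     # TERMINAL: Step complete (differentiated by suffix semantics)
--     # -Vm (am/om/im/m) = line-final completion (C375: 82% line-final)
--     # -y = basic terminal (step done)
--     # -dy = herb/gentle terminal with yield (C527)
--     # -ry = process complete terminal
--     'am': ('TERMINAL', 'complete'),
--     'om': ('TERMINAL', 'complete'),
--     'm': ('TERMINAL', 'complete'),
--     'im': ('TERMINAL', 'complete'),
--     'y': ('TERMINAL', 'done'),
--     'dy': ('TERMINAL', 'yielded'),
--     'ry': ('TERMINAL', 'finished'),
-- }
--
-- def get_fl_state(word: str, middle: str) -> tuple:
--     """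
--     Get FL state for a token.
--
--     Returns (fl_state, fl_meaning) or (None, None)
--     """
--     # Check MIDDLE first (most specific)
--     if middle and middle in FL_STAGE_MAP:
--         return FL_STAGE_MAP[middle]
--
--     # Check whole word for standalone tokens
--     if word in FL_STAGE_MAP:
--         return FL_STAGE_MAP[word]
--
--     # Check suffix patterns (for absorbed suffixes)
--     if middle:
--         # Check longest matches first
--         for pattern in sorted(FL_STAGE_MAP.keys(), key=len, reverse=True):
--             if middle.endswith(pattern) and len(pattern) >= 1:
--                 return FL_STAGE_MAP[pattern]
--
--     return None, None
-- ===== SOURCE B (Python) =====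
-- FL_STAGE_MAP = {
--     'ii': ('INITIAL', 'raw input'),
--     'i': ('INITIAL', 'input'),
--     'an': ('INITIAL', 'adding'),
--     'a': ('INITIAL', 'begin'),
--     'in': ('EARLY', 'loaded'),
--     'r': ('MEDIAL', 'reacting'),
--     'ar': ('MEDIAL', 'needs adjust'),
--     'al': ('MEDIAL', 'adjusting'),
--     'l': ('MEDIAL', 'separating'),
--     'ol': ('MEDIAL', 'processing'),
--     's': ('MEDIAL', 'next'),
--     'aiin': ('MEDIAL', 'still separating'),
--     'ain': ('MEDIAL', 'separating'),
--     'or': ('MEDIAL', 'continue'),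
--     'yl': ('MEDIAL', 'pouring'),
--     'd': ('MEDIAL', 'during'),
--     't': ('MEDIAL', 'transfer'),
--     'o': ('LATE', 'nearly done'),
--     'ly': ('LATE', 'settling out'),
--     'oiin': ('LATE', 'settling'),
--     'am': ('TERMINAL', 'complete'),
--     'om': ('TERMINAL', 'complete'),
--     'm': ('TERMINAL', 'complete'),
--     'im': ('TERMINAL', 'complete'),
--     'y': ('TERMINAL', 'done'),
--     'dy': ('TERMINAL', 'yielded'),
--     'ry': ('TERMINAL', 'finished'),
-- }
--
-- def get_fl_state(word: str, middle: str) -> tuple: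
--     """Get FL state for a token.  Returns (fl_state, fl_meaning) or (None, None)."""
--     # single pass over the map: track exact middle match, exact word match, and
--     # the longest suffix of `middle` seen so far (lengths are unique per suffix,
--     # so the maximum is unambiguous)
--     mid_exact = None
--     word_hit = None
--     best = None
--     best_len = -1
--     for k, v in FL_STAGE_MAP.items():
--         if middle and k == middle:
--             mid_exact = v
--         if k == word:
--             word_hit = v
--         if middle and middle.endswith(k) and len(k) > best_len:
--             best = v
--             best_len = len(k)
--     if mid_exact is not None:
--         return mid_exact
--     if word_hit is not None:
--         return word_hit
--     if best is not None:
--         return best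
--     return None, None
-- ===== Notes on version B (the rewrite author's own statement) =====
-- stated objective: alternative
-- what changed: B makes one pass over FL_STAGE_MAP items with three accumulators (exact-middle match, exact-word match, longest-suffix-so-far), instead of A's staged dict lookups followed by a per-call sort of all keys by length and a scan with endswith; correct because at most one key of each length can be a suffix of middle, so the running maximum equals A's first hit in the length-sorted scan.
import Mathlib
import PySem

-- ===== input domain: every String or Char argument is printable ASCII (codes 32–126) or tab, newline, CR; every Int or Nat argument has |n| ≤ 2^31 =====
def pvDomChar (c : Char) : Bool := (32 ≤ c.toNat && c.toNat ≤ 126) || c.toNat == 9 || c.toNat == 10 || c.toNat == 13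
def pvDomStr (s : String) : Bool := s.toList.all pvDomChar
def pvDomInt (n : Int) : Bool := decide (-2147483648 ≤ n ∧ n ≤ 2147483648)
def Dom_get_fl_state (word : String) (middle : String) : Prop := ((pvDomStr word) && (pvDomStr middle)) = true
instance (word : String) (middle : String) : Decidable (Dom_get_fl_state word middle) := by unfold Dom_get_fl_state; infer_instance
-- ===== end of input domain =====

-- B replaces A's staged dict lookups plus per-call sort-and-scan of the keys by a single pass over the
-- FL_STAGE_MAP items maintaining three accumulators (exact-middle, exact-word, longest suffix so far);
-- objective: alternative (same result, no per-call sort).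

-- FL_STAGE_MAP, keys as code-point lists, in the Python dict's insertion order (shared module constant)
def flPairs : List (List Char × (String × String)) := [
  ("ii".toList, ("INITIAL", "raw input")),
  ("i".toList, ("INITIAL", "input")),
  ("an".toList, ("INITIAL", "adding")),
  ("a".toList, ("INITIAL", "begin")),
  ("in".toList, ("EARLY", "loaded")),
  ("r".toList, ("MEDIAL", "reacting")),
  ("ar".toList, ("MEDIAL", "needs adjust")),
  ("al".toList, ("MEDIAL", "adjusting")),
  ("l".toList, ("MEDIAL", "separating")),
  ("ol".toList, ("MEDIAL", "processing")),
  ("s".toList, ("MEDIAL", "next")),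
  ("aiin".toList, ("MEDIAL", "still separating")),
  ("ain".toList, ("MEDIAL", "separating")),
  ("or".toList, ("MEDIAL", "continue")),
  ("yl".toList, ("MEDIAL", "pouring")),
  ("d".toList, ("MEDIAL", "during")),
  ("t".toList, ("MEDIAL", "transfer")),
  ("o".toList, ("LATE", "nearly done")),
  ("ly".toList, ("LATE", "settling out")),
  ("oiin".toList, ("LATE", "settling")),
  ("am".toList, ("TERMINAL", "complete")),
  ("om".toList, ("TERMINAL", "complete")),
  ("m".toList, ("TERMINAL", "complete")),
  ("im".toList, ("TERMINAL", "complete")),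
  ("y".toList, ("TERMINAL", "done")),
  ("dy".toList, ("TERMINAL", "yielded")),
  ("ry".toList, ("TERMINAL", "finished"))]

def flMap : PySem.Dict (List Char) (String × String) := PySem.Dict.ofList flPairs

-- ===== PORT A =====
-- A's 'for pattern in sorted(FL_STAGE_MAP.keys(), key=len, reverse=True): if middle.endswith(pattern) and len(pattern) >= 1: return FL_STAGE_MAP[pattern]'
def fl_scan : List (List Char) → List Char → Option String × Option String
  | [], _ => (none, none)
  | p :: rest, mid =>
    if PySem.Chars.endswith mid p = true ∧ 1 ≤ p.length then
      match flMap.get? p with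
      | some v => (some v.1, some v.2)
      | none => (none, none)   -- p is drawn from flMap.keys, so this branch is unreachable
    else fl_scan rest mid

def get_fl_state (word : String) (middle : String) : Option String × Option String :=
  let mid := middle.toList
  -- 'if middle and middle in FL_STAGE_MAP: return FL_STAGE_MAP[middle]' (guarded lookup)
  match (if mid ≠ [] then flMap.get? mid else none) with
  | some v => (some v.1, some v.2)
  | none =>
    -- 'if word in FL_STAGE_MAP: return FL_STAGE_MAP[word]'
    match flMap.get? word.toList with
    | some v => (some v.1, some v.2)
    | none =>
      if mid ≠ [] then
        fl_scan (PySem.List.sorted flMap.keys List.length true) mid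
      else (none, none)

-- ===== PORT B =====
-- B's single 'for k, v in FL_STAGE_MAP.items():' loop carrying (mid_exact, word_hit, (best, best_len))
def fl_pass (mid w : List Char) :
    List (List Char × (String × String)) →
    Option (String × String) × Option (String × String) × (Option (String × String) × Int) →
    Option (String × String) × Option (String × String) × (Option (String × String) × Int)
  | [], acc => acc
  | kv :: rest, (me, wh, bb) =>
      fl_pass mid w rest
        ((if mid ≠ [] ∧ kv.1 = mid then some kv.2 else me),
         (if kv.1 = w then some kv.2 else wh),
         (if mid ≠ [] ∧ PySem.Chars.endswith mid kv.1 = true ∧ (kv.1.length : Int) > bb.2 then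
            (some kv.2, (kv.1.length : Int)) else bb))

def get_fl_state_alt (word : String) (middle : String) : Option String × Option String :=
  let mid := middle.toList
  let w := word.toList
  let r := fl_pass mid w flPairs (none, none, (none, -1))
  match r.1 with
  | some v => (some v.1, some v.2)
  | none =>
    match r.2.1 with
    | some v => (some v.1, some v.2)
    | none =>
      match r.2.2.1 with
      | some v => (some v.1, some v.2)
      | none => (none, none)

-- ===== PRECONDITION & SPEC =====
def Spec_get_fl_state (word : String) (middle : String) (out : Option String × Option String) : Prop := out = get_fl_state_alt word middle
instance (word : String) (middle : String) (out : Option String × Option String) : Decidable (Spec_get_fl_state word middle out) := by unfold Spec_get_fl_state; infer_instance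

-- ===== CLAIM (what is proved, stated in full; the proofs are below) =====
def Claim_equal_get_fl_state : Prop := ∀ (word : String) (middle : String), Dom_get_fl_state word middle → Spec_get_fl_state word middle (get_fl_state word middle)

-- ===== LEMMAS AND PROOFS =====

theorem flMap_items : flMap.items = flPairs := by decide

theorem flPairs_nodup : (flPairs.map Prod.fst).Nodup := by decide

-- every key has length 1..4
theorem flPairs_len : ∀ kv ∈ flPairs, 1 ≤ kv.1.length ∧ kv.1.length ≤ 4 := by decide

-- looking up a member's own key finds its value (keys are distinct)
theorem flPairs_get : ∀ kv ∈ flPairs, flMap.get? kv.1 = some kv.2 := by decide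

-- the key groups of each length, in insertion order
def keys4 : List (List Char) := ["aiin".toList, "oiin".toList]
def keys3 : List (List Char) := ["ain".toList]
def keys2 : List (List Char) := ["ii".toList, "an".toList, "in".toList, "ar".toList, "al".toList,
  "ol".toList, "or".toList, "yl".toList, "ly".toList, "am".toList, "om".toList, "im".toList,
  "dy".toList, "ry".toList]
def keys1 : List (List Char) := ["i".toList, "a".toList, "r".toList, "l".toList, "s".toList,
  "d".toList, "t".toList, "o".toList, "m".toList, "y".toList]

-- the sorted key list A scans is exactly the length groups, longest first (stable sort)
theorem fl_sorted_keys :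
    PySem.List.sorted flMap.keys List.length true = keys4 ++ (keys3 ++ (keys2 ++ keys1)) := by decide

theorem bf4 : ∀ k ∈ keys4, k.length = 4 ∧ (flMap.get? k).isSome = true := by decide
theorem bf3 : ∀ k ∈ keys3, k.length = 3 ∧ (flMap.get? k).isSome = true := by decide
theorem bf2 : ∀ k ∈ keys2, k.length = 2 ∧ (flMap.get? k).isSome = true := by decide
theorem bf1 : ∀ k ∈ keys1, k.length = 1 ∧ (flMap.get? k).isSome = true := by decide

theorem inb4 : ∀ kv ∈ flPairs, kv.1.length = 4 → kv.1 ∈ keys4 := by decide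
theorem inb3 : ∀ kv ∈ flPairs, kv.1.length = 3 → kv.1 ∈ keys3 := by decide
theorem inb2 : ∀ kv ∈ flPairs, kv.1.length = 2 → kv.1 ∈ keys2 := by decide
theorem inb1 : ∀ kv ∈ flPairs, kv.1.length = 1 → kv.1 ∈ keys1 := by decide

-- middle.endswith(p) holds iff p is the length-p suffix of middle
theorem endswith_drop (mid p : List Char) :
    (PySem.Chars.endswith mid p = true) ↔
      (p.length ≤ mid.length ∧ mid.drop (mid.length - p.length) = p) := by
  rw [PySem.Chars.endswith_iff]
  constructor
  · intro h
    refine ⟨h.length_le, ?_⟩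
    obtain ⟨u, rfl⟩ := h
    simp
  · rintro ⟨h1, h2⟩
    exact h2 ▸ List.drop_suffix _ _

-- the length-L suffix lookup (none when middle is shorter than L)
def sfx (mid : List Char) (L : Nat) : Option (String × String) :=
  if L ≤ mid.length then flMap.get? (mid.drop (mid.length - L)) else none

-- the longest suffix of middle present in the map, tried from length 4 down
def bestSpec (mid : List Char) : Option (String × String) :=
  match sfx mid 4 with
  | some v => some v
  | none =>
    match sfx mid 3 with
    | some v => some v
    | none =>
      match sfx mid 2 with
      | some v => some v
      | none => sfx mid 1

theorem sfx_none_no_match {mid : List Char} {L : Nat} (h : sfx mid L = none) :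
    ∀ kv ∈ flPairs, PySem.Chars.endswith mid kv.1 = true → kv.1.length ≠ L := by
  intro kv hm hmat hlen
  obtain ⟨hle, hdrop⟩ := (endswith_drop mid kv.1).1 hmat
  rw [hlen] at hle hdrop
  unfold sfx at h
  rw [if_pos hle, hdrop] at h
  have h2 := flPairs_get kv hm
  rw [h] at h2
  cases h2

theorem sfx_some {mid : List Char} {L : Nat} {v : String × String} (h : sfx mid L = some v) :
    L ≤ mid.length ∧ flMap.get? (mid.drop (mid.length - L)) = some v := by
  unfold sfx at h
  by_cases hle : L ≤ mid.length
  · rw [if_pos hle] at h; exact ⟨hle, h⟩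
  · rw [if_neg hle] at h; cases h

theorem block_no_match {mid : List Char} {L : Nat} (h : sfx mid L = none)
    (bk : List (List Char)) (hbf : ∀ k ∈ bk, k.length = L ∧ (flMap.get? k).isSome = true) :
    ∀ k ∈ bk, ¬ (PySem.Chars.endswith mid k = true) := by
  intro k hk hmat
  obtain ⟨hle, hdrop⟩ := (endswith_drop mid k).1 hmat
  obtain ⟨hlen, hsome⟩ := hbf k hk
  rw [hlen] at hle hdrop
  unfold sfx at h
  rw [if_pos hle, hdrop] at h
  rw [h] at hsome
  simp at hsome

-- ---- the A-side scan, block by block ----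

theorem scan_skip {mid : List Char} :
    ∀ (ks rest : List (List Char)), (∀ k ∈ ks, ¬ (PySem.Chars.endswith mid k = true)) →
      fl_scan (ks ++ rest) mid = fl_scan rest mid := by
  intro ks
  induction ks with
  | nil => intro rest _; rfl
  | cons k ks ih =>
    intro rest h
    simp only [List.cons_append, fl_scan]
    rw [if_neg (fun hc => h k (List.mem_cons_self) hc.1)]
    exact ih rest (fun k' hk' => h k' (List.mem_cons_of_mem _ hk'))

theorem scan_hit {mid : List Char} {L : Nat} (hL1 : 1 ≤ L) {v : String × String}
    (hs : sfx mid L = some v) :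
    ∀ (ks rest : List (List Char)), (∀ k ∈ ks, k.length = L) →
      mid.drop (mid.length - L) ∈ ks →
      fl_scan (ks ++ rest) mid = (some v.1, some v.2) := by
  obtain ⟨hle, hg⟩ := sfx_some hs
  intro ks
  induction ks with
  | nil => intro rest _ hmem; cases hmem
  | cons k ks ih =>
    intro rest hlens hmem
    by_cases hk : k = mid.drop (mid.length - L)
    · have hklen : k.length = L := hlens k List.mem_cons_self
      have hmat : PySem.Chars.endswith mid k = true := by
        refine (endswith_drop mid k).2 ⟨?_, ?_⟩
        · rw [hklen]; exact hle
        · rw [hklen]; exact hk.symm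
      simp only [List.cons_append, fl_scan]
      rw [if_pos ⟨hmat, by omega⟩, hk, hg]
    · have hmat : ¬ (PySem.Chars.endswith mid k = true) := by
        intro hmat
        obtain ⟨hle', hdrop⟩ := (endswith_drop mid k).1 hmat
        rw [hlens k List.mem_cons_self] at hdrop
        exact hk hdrop.symm
      simp only [List.cons_append, fl_scan]
      rw [if_neg (fun hc => hmat hc.1)]
      have hmem' : mid.drop (mid.length - L) ∈ ks := by
        cases hmem with
        | head => exact absurd rfl hk
        | tail _ h => exact h
      exact ih rest (fun k' hk' => hlens k' (List.mem_cons_of_mem _ hk')) hmem'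

theorem drop_mem_block {mid : List Char} {L : Nat} {v : String × String}
    (hs : sfx mid L = some v)
    (inb : ∀ kv ∈ flPairs, kv.1.length = L → kv.1 ∈ (bk : List (List Char))) :
    mid.drop (mid.length - L) ∈ bk := by
  obtain ⟨hle, hg⟩ := sfx_some hs
  have hmem : (mid.drop (mid.length - L), v) ∈ flPairs := by
    rw [← flMap_items]; exact PySem.Dict.mem_items_of_get?_eq_some flMap hg
  exact inb _ hmem (by simp; omega)

theorem scanA (mid : List Char) :
    fl_scan (PySem.List.sorted flMap.keys List.length true) mid =
      (match bestSpec mid with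
       | some v => (some v.1, some v.2)
       | none => (none, none)) := by
  rw [fl_sorted_keys]
  unfold bestSpec
  cases h4 : sfx mid 4 with
  | some v =>
    rw [scan_hit (by omega) h4 keys4 _ (fun k hk => (bf4 k hk).1) (drop_mem_block h4 inb4)]
  | none =>
    rw [scan_skip keys4 _ (block_no_match h4 keys4 bf4)]
    cases h3 : sfx mid 3 with
    | some v =>
      rw [scan_hit (by omega) h3 keys3 _ (fun k hk => (bf3 k hk).1) (drop_mem_block h3 inb3)]
    | none =>
      rw [scan_skip keys3 _ (block_no_match h3 keys3 bf3)]
      cases h2 : sfx mid 2 with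
      | some v =>
        rw [scan_hit (by omega) h2 keys2 _ (fun k hk => (bf2 k hk).1) (drop_mem_block h2 inb2)]
      | none =>
        rw [scan_skip keys2 _ (block_no_match h2 keys2 bf2)]
        cases h1 : sfx mid 1 with
        | some v =>
          rw [← List.append_nil keys1,
            scan_hit (by omega) h1 keys1 [] (fun k hk => (bf1 k hk).1) (drop_mem_block h1 inb1)]
        | none =>
          rw [← List.append_nil keys1, scan_skip keys1 [] (block_no_match h1 keys1 bf1)]
          rfl

-- ---- B's loop, split into its three independent accumulators ----

def epass (m : List Char) : List (List Char × (String × String)) →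
    Option (String × String) → Option (String × String)
  | [], a => a
  | kv :: rest, a => epass m rest (if kv.1 = m then some kv.2 else a)

def bpass (m : List Char) : List (List Char × (String × String)) →
    Option (String × String) × Int → Option (String × String) × Int
  | [], a => a
  | kv :: rest, a =>
      bpass m rest
        (if PySem.Chars.endswith m kv.1 = true ∧ (kv.1.length : Int) > a.2 then
          (some kv.2, (kv.1.length : Int)) else a)

theorem fl_pass_split (mid w : List Char) :
    ∀ (ps : List (List Char × (String × String))) (me wh : Option (String × String))
      (bb : Option (String × String) × Int),
    fl_pass mid w ps (me, wh, bb) =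
      ((if mid = [] then me else epass mid ps me), epass w ps wh,
       (if mid = [] then bb else bpass mid ps bb)) := by
  intro ps
  induction ps with
  | nil => intro me wh bb; by_cases h : mid = [] <;> simp [fl_pass, epass, bpass, h]
  | cons kv ps ih =>
    intro me wh bb
    by_cases h : mid = []
    · subst h
      simp only [fl_pass, ne_eq, not_true_eq_false, false_and, if_false]
      rw [ih]
      simp [epass]
    · simp only [fl_pass, ne_eq, h, not_false_eq_true, true_and]
      rw [ih]
      simp [epass, bpass, h]

theorem epass_none {m : List Char} :
    ∀ (ps : List (List Char × (String × String))) (a : Option (String × String)),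
      (∀ kv ∈ ps, kv.1 ≠ m) → epass m ps a = a := by
  intro ps
  induction ps with
  | nil => intro a _; rfl
  | cons kv ps ih =>
    intro a h
    simp only [epass]
    rw [if_neg (h kv List.mem_cons_self)]
    exact ih a (fun kv' hk' => h kv' (List.mem_cons_of_mem _ hk'))

theorem epass_mem {m : List Char} :
    ∀ (ps : List (List Char × (String × String))), (ps.map Prod.fst).Nodup →
      ∀ (v : String × String), (m, v) ∈ ps → ∀ a, epass m ps a = some v := by
  intro ps
  induction ps with
  | nil => intro _ v hmem; cases hmem
  | cons kv ps ih =>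
    intro hnd v hmem a
    rw [List.map_cons, List.nodup_cons] at hnd
    simp only [epass]
    cases hmem with
    | head =>
      rw [if_pos rfl]
      refine epass_none ps (some v) (fun kv' hk' heq => hnd.1 ?_)
      exact List.mem_map.2 ⟨kv', hk', heq⟩
    | tail _ hmem' =>
      have hk : kv.1 ≠ m := by
        intro heq
        exact hnd.1 (List.mem_map.2 ⟨(m, v), hmem', heq.symm⟩)
      rw [if_neg hk]
      exact ih hnd.2 v hmem' a

theorem epass_eq_get? (m : List Char) : epass m flPairs none = flMap.get? m := by
  cases hg : flMap.get? m with
  | some v =>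
    have hmem : (m, v) ∈ flPairs := by
      rw [← flMap_items]; exact PySem.Dict.mem_items_of_get?_eq_some flMap hg
    exact epass_mem flPairs flPairs_nodup v hmem none
  | none =>
    refine epass_none flPairs none (fun kv hk heq => ?_)
    have h2 := flPairs_get kv hk
    rw [heq, hg] at h2
    cases h2

theorem bpass_stable {m : List Char} :
    ∀ (ps : List (List Char × (String × String))) (b : Option (String × String)) (bl : Int),
      (∀ kv ∈ ps, PySem.Chars.endswith m kv.1 = true → (kv.1.length : Int) ≤ bl) →
      bpass m ps (b, bl) = (b, bl) := by
  intro ps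
  induction ps with
  | nil => intro b bl _; rfl
  | cons kv ps ih =>
    intro b bl h
    simp only [bpass]
    rw [if_neg (fun hc => absurd hc.2 (not_lt.2 (h kv List.mem_cons_self hc.1)))]
    exact ih b bl (fun kv' hk' => h kv' (List.mem_cons_of_mem _ hk'))

theorem bpass_hit {m : List Char} (L : Nat) :
    ∀ (ps : List (List Char × (String × String))) (b : Option (String × String)) (bl : Int),
      bl < (L : Int) →
      (∃ kv ∈ ps, PySem.Chars.endswith m kv.1 = true ∧ kv.1.length = L) →
      (∀ kv ∈ ps, PySem.Chars.endswith m kv.1 = true → kv.1.length ≤ L) →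
      ∃ kv ∈ ps, PySem.Chars.endswith m kv.1 = true ∧ kv.1.length = L ∧
        bpass m ps (b, bl) = (some kv.2, (L : Int)) := by
  intro ps
  induction ps with
  | nil => rintro b bl _ ⟨kv, hmem, _⟩ _; cases hmem
  | cons kv0 ps ih =>
    intro b bl hbl hex hbound
    by_cases hm0 : PySem.Chars.endswith m kv0.1 = true
    · by_cases hl0 : kv0.1.length = L
      · refine ⟨kv0, List.mem_cons_self, hm0, hl0, ?_⟩
        simp only [bpass]
        rw [if_pos ⟨hm0, by rw [hl0]; exact hbl⟩, hl0]
        exact bpass_stable ps _ _ (fun kv' hk' hmat =>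
          by exact_mod_cast hbound kv' (List.mem_cons_of_mem _ hk') hmat)
      · have hlt : kv0.1.length < L :=
          lt_of_le_of_ne (hbound kv0 List.mem_cons_self hm0) hl0
        have hex' : ∃ kv ∈ ps, PySem.Chars.endswith m kv.1 = true ∧ kv.1.length = L := by
          obtain ⟨kv, hmem, hmat, hlen⟩ := hex
          cases hmem with
          | head => exact absurd hlen hl0
          | tail _ h => exact ⟨kv, h, hmat, hlen⟩
        have hbound' := fun kv' hk' => hbound kv' (List.mem_cons_of_mem _ hk')
        simp only [bpass]
        by_cases hc : (kv0.1.length : Int) > bl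
        · rw [if_pos ⟨hm0, hc⟩]
          obtain ⟨kv, hmem, hmat, hlen, heq⟩ :=
            ih (some kv0.2) (kv0.1.length : Int) (by exact_mod_cast hlt) hex' hbound'
          exact ⟨kv, List.mem_cons_of_mem _ hmem, hmat, hlen, heq⟩
        · rw [if_neg (fun hcc => hc hcc.2)]
          obtain ⟨kv, hmem, hmat, hlen, heq⟩ := ih b bl hbl hex' hbound'
          exact ⟨kv, List.mem_cons_of_mem _ hmem, hmat, hlen, heq⟩
    · have hex' : ∃ kv ∈ ps, PySem.Chars.endswith m kv.1 = true ∧ kv.1.length = L := by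
        obtain ⟨kv, hmem, hmat, hlen⟩ := hex
        cases hmem with
        | head => exact absurd hmat hm0
        | tail _ h => exact ⟨kv, h, hmat, hlen⟩
      simp only [bpass]
      rw [if_neg (fun hc => hm0 hc.1)]
      obtain ⟨kv, hmem, hmat, hlen, heq⟩ :=
        ih b bl hbl hex' (fun kv' hk' => hbound kv' (List.mem_cons_of_mem _ hk'))
      exact ⟨kv, List.mem_cons_of_mem _ hmem, hmat, hlen, heq⟩

-- in a hit case: the hit suffix itself matches
theorem sfx_witness {mid : List Char} {L : Nat} {v : String × String} (hL1 : 1 ≤ L)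
    (hs : sfx mid L = some v) :
    ∃ kv ∈ flPairs, PySem.Chars.endswith mid kv.1 = true ∧ kv.1.length = L := by
  obtain ⟨hle, hg⟩ := sfx_some hs
  have hmem : (mid.drop (mid.length - L), v) ∈ flPairs := by
    rw [← flMap_items]; exact PySem.Dict.mem_items_of_get?_eq_some flMap hg
  have hdl : (mid.drop (mid.length - L)).length = L := by simp; omega
  refine ⟨_, hmem, ?_, hdl⟩
  refine (endswith_drop _ _).2 ⟨?_, ?_⟩
  · rw [hdl]; exact hle
  · rw [hdl]

-- from the result of bpass_hit at level L, read off the value: it is the sfx L value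
theorem bpass_value {mid : List Char} {L : Nat} {v : String × String}
    (hs : sfx mid L = some v) {kv : List Char × (String × String)}
    (hmem : kv ∈ flPairs) (hmat : PySem.Chars.endswith mid kv.1 = true)
    (hlen : kv.1.length = L) : kv.2 = v := by
  obtain ⟨_, hg⟩ := sfx_some hs
  obtain ⟨hle, hdrop⟩ := (endswith_drop mid kv.1).1 hmat
  rw [hlen] at hdrop
  have h2 := flPairs_get kv hmem
  rw [← hdrop, hg] at h2
  cases h2
  rfl

theorem bpassB (mid : List Char) : (bpass mid flPairs (none, -1)).1 = bestSpec mid := by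
  unfold bestSpec
  cases h4 : sfx mid 4 with
  | some v =>
    obtain ⟨kv, hmem, hmat, hlen, heq⟩ := bpass_hit 4 flPairs none (-1) (by omega)
      (sfx_witness (by omega) h4) (fun kv hk _ => (flPairs_len kv hk).2)
    rw [heq, bpass_value h4 hmem hmat hlen]
  | none =>
    cases h3 : sfx mid 3 with
    | some v =>
      obtain ⟨kv, hmem, hmat, hlen, heq⟩ := bpass_hit 3 flPairs none (-1) (by omega)
        (sfx_witness (by omega) h3)
        (fun kv hk hmat => by
          have := flPairs_len kv hk
          have := sfx_none_no_match h4 kv hk hmat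
          omega)
      rw [heq, bpass_value h3 hmem hmat hlen]
    | none =>
      cases h2 : sfx mid 2 with
      | some v =>
        obtain ⟨kv, hmem, hmat, hlen, heq⟩ := bpass_hit 2 flPairs none (-1) (by omega)
          (sfx_witness (by omega) h2)
          (fun kv hk hmat => by
            have := flPairs_len kv hk
            have := sfx_none_no_match h4 kv hk hmat
            have := sfx_none_no_match h3 kv hk hmat
            omega)
        rw [heq, bpass_value h2 hmem hmat hlen]
      | none =>
        cases h1 : sfx mid 1 with
        | some v =>
          obtain ⟨kv, hmem, hmat, hlen, heq⟩ := bpass_hit 1 flPairs none (-1) (by omega)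
            (sfx_witness (by omega) h1)
            (fun kv hk hmat => by
              have := flPairs_len kv hk
              have := sfx_none_no_match h4 kv hk hmat
              have := sfx_none_no_match h3 kv hk hmat
              have := sfx_none_no_match h2 kv hk hmat
              omega)
          rw [heq, bpass_value h1 hmem hmat hlen]
        | none =>
          rw [bpass_stable flPairs none (-1)
            (fun kv hk hmat => by
              exfalso
              have := flPairs_len kv hk
              have := sfx_none_no_match h4 kv hk hmat
              have := sfx_none_no_match h3 kv hk hmat
              have := sfx_none_no_match h2 kv hk hmat
              have := sfx_none_no_match h1 kv hk hmat
              omega)]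

-- ===== VERDICT (by name: the statement is the Claim_ definition above) =====
theorem get_fl_state_spec : Claim_equal_get_fl_state := by
  intro word middle _
  show get_fl_state word middle = get_fl_state_alt word middle
  simp only [get_fl_state, get_fl_state_alt]
  rw [fl_pass_split]
  by_cases hm : middle.toList = []
  · simp [hm, epass_eq_get?]
  · simp only [ne_eq, hm, not_false_eq_true, if_true, if_false, epass_eq_get?]
    cases hg1 : flMap.get? middle.toList with
    | some v => simp
    | none =>
      cases hg2 : flMap.get? word.toList with
      | some v => simp
      | none =>
        rw [scanA, bpassB]
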